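-- pv_equiv track=rewrite | github.com/HITOfficial/College | WDI/lekcja 3 21.10.2020/zad6.py | lowest_difference
-- ===== SOURCE A (Python) =====
-- def lowest_difference(dividing_list, number):
--     lowest_difference = number # pobrałem liczbę z której będę liczył wartość pod modułem z dzielników tak, aby się móc na czymś wzorować i mieć do warunku
--     number1, number2 = 0, 0 # zrobiłem dwie zmienne na początku, do których potem będę przypisywał liczby spełniające warunek
--     for el1 in dividing_list:
--         for el2 in dividing_list:
--             if abs(el1 - el2) < lowest_difference and el1 != el2 and el1 * el2 == number: # w tym warunku wstępnie najmniejszą różnicą jest liczba początkowa z której sprawdzamy dzielniki, następnie robię 2 wymiarową tablicę i iteruję sobie po wszystkich elementach, sprawdzając, czy wartość bezwzględna tych dwóch elementów jest mniejsza od liczby z początku, następnie, czy są to dwie różne liczby, oraz, czy iloczyn tych dwóch liczb jest równy liczbie z której mamy dzielniki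
--                 lowest_difference = abs(el1 - el2) # gdy wejdziemy do warunku, to do najmniejszej róznicy przypisujemy wartość bezwzględną tych 2 elementów
--                 number1 = el1 # do tych dwóch liczb, z lini 18 przypisuję wartośći spełniające warunek
--                 number2 = el2
--     return (number1, number2) # zwracam dwie najmniejsze liczby spełniające ten warunek
-- ===== SOURCE B (Python) =====
-- def lowest_difference(dividing_list, number):
--     values = set(dividing_list)
--     best = number
--     pair = (0, 0)
--     for el1 in dividing_list:
--         if el1 == 0:
--             continue
--         q, r = divmod(number, el1)
--         if r == 0 and q != el1 and q in values and abs(el1 - q) < best: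
--             best = abs(el1 - q)
--             pair = (el1, q)
--     return pair
-- ===== Notes on version B (the rewrite author's own statement) =====
-- stated objective: faster
-- what changed: Replaces the O(n^2) double scan over all ordered pairs by a single pass that computes the unique exact cofactor number//el1 for each element and tests its presence in a set built once.
import Mathlib
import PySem

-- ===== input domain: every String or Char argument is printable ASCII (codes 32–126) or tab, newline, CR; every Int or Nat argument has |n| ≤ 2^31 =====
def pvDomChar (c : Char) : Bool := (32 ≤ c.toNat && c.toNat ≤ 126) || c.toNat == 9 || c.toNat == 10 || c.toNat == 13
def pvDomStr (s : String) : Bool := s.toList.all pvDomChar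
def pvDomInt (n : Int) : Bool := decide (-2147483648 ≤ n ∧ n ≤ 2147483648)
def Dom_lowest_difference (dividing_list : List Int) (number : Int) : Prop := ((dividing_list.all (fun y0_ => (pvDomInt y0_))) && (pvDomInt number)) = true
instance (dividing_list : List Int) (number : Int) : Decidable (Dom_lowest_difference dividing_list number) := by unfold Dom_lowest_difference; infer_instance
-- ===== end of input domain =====

-- B replaces A's O(n^2) double scan by a single pass computing the unique exact
-- cofactor number//el1 and testing membership in a set built once (faster, asymptotic).

-- ===== PORT A =====
-- state = (lowest_difference, number1, number2)
def lowest_difference (dividing_list : List Int) (number : Int) : Int × Int :=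
  let st :=
    dividing_list.foldl (fun st el1 =>
      dividing_list.foldl (fun st el2 =>
        if |el1 - el2| < st.1 ∧ el1 ≠ el2 ∧ el1 * el2 = number then
          (|el1 - el2|, el1, el2)
        else st) st) ((number, 0, 0) : Int × Int × Int)
  (st.2.1, st.2.2)

-- ===== PORT B =====
-- state = (best, pair); values = set(dividing_list); q, r = divmod(number, el1)
def lowest_difference_alt (dividing_list : List Int) (number : Int) : Int × Int :=
  let values : PySem.Set Int := PySem.Set.ofList dividing_list
  let st :=
    dividing_list.foldl (fun st el1 =>
      if el1 = 0 then st
      else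
        let q := PySem.Int.floordiv number el1
        let r := PySem.Int.mod number el1
        if r = 0 ∧ q ≠ el1 ∧ PySem.Set.contains values q = true ∧ |el1 - q| < st.1 then
          (|el1 - q|, (el1, q))
        else st) ((number, ((0 : Int), (0 : Int))) : Int × Int × Int)
  st.2

-- ===== PRECONDITION & SPEC =====
def Spec_lowest_difference (dividing_list : List Int) (number : Int) (out : Int × Int) : Prop := out = lowest_difference_alt dividing_list number
instance (dividing_list : List Int) (number : Int) (out : Int × Int) : Decidable (Spec_lowest_difference dividing_list number out) := by unfold Spec_lowest_difference; infer_instance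

-- ===== CLAIM (what is proved, stated in full; the proofs are below) =====
def Claim_equal_lowest_difference : Prop := ∀ (dividing_list : List Int) (number : Int), Dom_lowest_difference dividing_list number → Spec_lowest_difference dividing_list number (lowest_difference dividing_list number)

-- ===== LEMMAS AND PROOFS =====

-- a fold whose step fixes the given start state never moves off it
theorem pv_foldl_fixed {α β : Type} (f : β → α → β) (st : β) (l : List α)
    (h : ∀ x ∈ l, f st x = st) : l.foldl f st = st := by
  induction l with
  | nil => rfl
  | cons x xs ih =>
      simp only [List.foldl_cons, h x (by simp)]
      exact ih (fun y hy => h y (by simp [hy]))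

-- "first hit wins": folding a step that can only fire on element q, jumping to a
-- state c on which the guard is dead, is a single conditional update
theorem pv_foldl_firsthit {α β : Type} [DecidableEq α] (q : α) (c : β)
    (P : β → Prop) [DecidablePred P] (hc : ¬ P c) (l : List α) (st : β) :
    l.foldl (fun st x => if x = q ∧ P st then c else st) st
      = if q ∈ l ∧ P st then c else st := by
  induction l generalizing st with
  | nil => simp
  | cons x xs ih =>
      simp only [List.foldl_cons]
      by_cases hx : x = q
      · subst hx
        by_cases hp : P st
        · rw [if_pos ⟨rfl, hp⟩, ih c, if_neg (by exact fun h => hc h.2),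
            if_pos ⟨by simp, hp⟩]
        · rw [if_neg (by exact fun h => hp h.2), ih st, if_neg (by exact fun h => hp h.2),
            if_neg (by exact fun h => hp h.2)]
      · rw [if_neg (by exact fun h => hx h.1), ih st]
        have hiff : q ∈ x :: xs ∧ P st ↔ q ∈ xs ∧ P st := by
          simp only [List.mem_cons, and_congr_left_iff]
          intro _
          constructor
          · rintro (rfl|h); exact absurd rfl hx; exact h
          · exact Or.inr
        rw [if_congr hiff rfl rfl]

-- one outer step of A (the whole inner scan) equals one step of B
theorem pv_inner_step (l : List Int) (number el1 : Int) (st : Int × Int × Int)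
    (hst : st.1 ≤ number) :
    l.foldl (fun st el2 =>
        if |el1 - el2| < st.1 ∧ el1 ≠ el2 ∧ el1 * el2 = number then
          (|el1 - el2|, el1, el2)
        else st) st
      = (if el1 = 0 then st
         else
           let q := PySem.Int.floordiv number el1
           let r := PySem.Int.mod number el1
           if r = 0 ∧ q ≠ el1 ∧ PySem.Set.contains (PySem.Set.ofList l) q = true ∧ |el1 - q| < st.1 then
             (|el1 - q|, (el1, q))
           else st) := by
  by_cases h0 : el1 = 0
  · subst h0
    rw [if_pos rfl]
    apply pv_foldl_fixed
    intro x _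
    rw [if_neg]
    rintro ⟨hlt, -, hnum⟩
    rw [zero_mul] at hnum
    subst hnum
    have : (0:Int) ≤ |0 - x| := abs_nonneg _
    omega
  · simp only [if_neg h0]
    by_cases hd : el1 ∣ number
    · -- exact cofactor q with el1 * q = number
      dsimp only
      have hr : PySem.Int.mod number el1 = 0 :=
        (PySem.Int.mod_eq_zero_iff_dvd number el1).mpr hd
      set q := PySem.Int.floordiv number el1 with hq
      have hmul : el1 * q = number := by
        have h2 := PySem.Int.floordiv_mul_add_mod number el1
        rw [← hq, hr] at h2
        linarith [mul_comm q el1]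
      have hstep : (fun (st : Int × Int × Int) el2 =>
          if |el1 - el2| < st.1 ∧ el1 ≠ el2 ∧ el1 * el2 = number then
            ((|el1 - el2|, el1, el2) : Int × Int × Int)
          else st)
        = (fun st el2 => if el2 = q ∧ (|el1 - q| < st.1 ∧ q ≠ el1) then
            ((|el1 - q|, el1, q) : Int × Int × Int) else st) := by
        funext st' el2
        by_cases he : el2 = q
        · subst he
          by_cases hc1 : |el1 - q| < st'.1 ∧ el1 ≠ q ∧ el1 * q = number
          · rw [if_pos hc1, if_pos ⟨rfl, hc1.1, fun h => hc1.2.1 h.symm⟩]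
          · rw [if_neg hc1, if_neg]
            rintro ⟨-, hlt, hne⟩
            exact hc1 ⟨hlt, fun h => hne h.symm, hmul⟩
        · rw [if_neg, if_neg]
          · rintro ⟨h, -⟩; exact he h
          · rintro ⟨-, -, hm⟩
            exact he (mul_left_cancel₀ h0 (hm.trans hmul.symm))
      rw [hstep, pv_foldl_firsthit q ((|el1 - q|, el1, q) : Int × Int × Int)
        (fun st => |el1 - q| < st.1 ∧ q ≠ el1)
        (fun h => absurd h.1 (by simp)) l st]
      by_cases hm : q ∈ l
      · have hcont : PySem.Set.contains (PySem.Set.ofList l) q = true := by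
          rw [PySem.Set.contains_iff, PySem.Set.mem_ofList]; exact hm
        by_cases hne : q = el1
        · rw [if_neg, if_neg]
          · rintro ⟨-, h, -⟩; exact h hne
          · rintro ⟨-, h⟩; exact h.2 hne
        · by_cases hlt : |el1 - q| < st.1
          · rw [if_pos ⟨hm, hlt, hne⟩, if_pos ⟨hr, hne, hcont, hlt⟩]
          · rw [if_neg, if_neg]
            · rintro ⟨-, -, -, h⟩; exact hlt h
            · rintro ⟨-, h, -⟩; exact hlt h
      · rw [if_neg, if_neg]
        · rintro ⟨-, -, hcont, -⟩
          rw [PySem.Set.contains_iff, PySem.Set.mem_ofList] at hcont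
          exact hm hcont
        · rintro ⟨h, -⟩; exact hm h
    · -- el1 does not divide number: no el2 can satisfy el1 * el2 = number
      have hr : ¬ PySem.Int.mod number el1 = 0 :=
        fun h => hd ((PySem.Int.mod_eq_zero_iff_dvd number el1).mp h)
      rw [if_neg (by rintro ⟨h, -⟩; exact hr h)]
      apply pv_foldl_fixed
      intro x _
      rw [if_neg]
      rintro ⟨-, -, hm⟩
      exact hd ⟨x, hm.symm⟩

-- ===== VERDICT (by name: the statement is the Claim_ definition above) =====
-- outer loops agree, carrying the invariant st.1 ≤ number
theorem pv_outer (number : Int) (l : List Int) :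
    ∀ (l' : List Int) (st : Int × Int × Int), st.1 ≤ number →
    l'.foldl (fun st el1 =>
        l.foldl (fun st el2 =>
          if |el1 - el2| < st.1 ∧ el1 ≠ el2 ∧ el1 * el2 = number then
            (|el1 - el2|, el1, el2)
          else st) st) st
      = l'.foldl (fun st el1 =>
          if el1 = 0 then st
          else
            let q := PySem.Int.floordiv number el1
            let r := PySem.Int.mod number el1
            if r = 0 ∧ q ≠ el1 ∧ PySem.Set.contains (PySem.Set.ofList l) q = true ∧ |el1 - q| < st.1 then
              (|el1 - q|, (el1, q))
            else st) st := by
  intro l'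
  induction l' with
  | nil => intro st _; rfl
  | cons el1 xs ih =>
      intro st hst
      simp only [List.foldl_cons]
      rw [pv_inner_step l number el1 st hst]
      apply ih
      dsimp only
      split_ifs with h1 h2
      · exact hst
      · dsimp only; omega
      · exact hst

theorem lowest_difference_spec : Claim_equal_lowest_difference := by
  intro dividing_list number _
  unfold Spec_lowest_difference lowest_difference lowest_difference_alt
  dsimp only
  rw [pv_outer number dividing_list dividing_list (number, 0, 0) le_rfl]
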